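-- pv_equiv track=rewrite | github.com/einhellcentralasia/test_ostatki | 2_sku_master.py | normalize_sp_path
-- ===== SOURCE A (Python) =====
-- def normalize_sp_path(p: str) -> str:
--     p2 = p.strip().replace("\\", "/").lstrip("/")
--     while "//" in p2:
--         p2 = p2.replace("//", "/")
--     low = p2.lower()
--     for prefix in ("shared documents/", "documents/"):
--         if low.startswith(prefix):
--             p2 = p2[len(prefix):]
--             break
--     return p2
-- ===== SOURCE B (Python) =====
-- def normalize_sp_path(p: str) -> str:
--     s = p.strip().replace("\\", "/")
--     # single pass: skip a '/' when the previous emitted state is a slash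
--     # (initially True, so leading slashes are skipped too)
--     out = []
--     prev_slash = True
--     for c in s:
--         if c == '/':
--             if prev_slash:
--                 continue
--             prev_slash = True
--         else:
--             prev_slash = False
--         out.append(c)
--     p2 = ''.join(out)
--     low = p2.lower()
--     if low.startswith("shared documents/"):
--         return p2[len("shared documents/"):]
--     if low.startswith("documents/"):
--         return p2[len("documents/"):]
--     return p2
-- ===== Notes on version B (the rewrite author's own statement) =====
-- stated objective: alternative
-- what changed: replaced the repeated double-slash replace-until-fixpoint loop and the separate leading-slash strip with one linear scan that skips a slash immediately following an emitted slash
import Mathlib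
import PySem

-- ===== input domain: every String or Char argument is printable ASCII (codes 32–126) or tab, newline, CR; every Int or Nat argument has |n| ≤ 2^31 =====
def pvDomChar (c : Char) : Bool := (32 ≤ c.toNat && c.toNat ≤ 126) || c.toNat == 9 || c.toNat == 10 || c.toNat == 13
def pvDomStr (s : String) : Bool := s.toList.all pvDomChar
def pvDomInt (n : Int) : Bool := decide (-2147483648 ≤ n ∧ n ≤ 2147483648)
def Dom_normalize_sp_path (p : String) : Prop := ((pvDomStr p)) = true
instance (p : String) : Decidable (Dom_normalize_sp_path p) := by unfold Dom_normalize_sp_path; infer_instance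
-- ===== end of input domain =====

-- B replaces A's replace('//','/')-until-fixpoint rescanning loop with one linear scan
-- that drops a '/' immediately following an emitted '/'; return values are identical.

-- ===== PORT A =====
-- termination helpers for the 'while "//" in p2' loop: one replace pass, and it shrinks
def pvRepOnce : List Char → List Char
  | '/' :: '/' :: t => '/' :: pvRepOnce t
  | c :: t => c :: pvRepOnce t
  | [] => []

theorem pvRepOnce_dd (t : List Char) : pvRepOnce ('/' :: '/' :: t) = '/' :: pvRepOnce t := by
  simp [pvRepOnce]

theorem pvRepOnce_cons_ne (c : Char) (t : List Char) (h : ¬ (c = '/' ∧ ∃ u, t = '/' :: u)) :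
    pvRepOnce (c :: t) = c :: pvRepOnce t := by
  rw [pvRepOnce.eq_def]
  split
  · rename_i heq
    injection heq with h1 h2
    exact absurd ⟨h1, _, h2⟩ h
  · rename_i heq
    injection heq with h1 h2
    rw [h1, h2]
  · rename_i heq; exact absurd heq (by simp)

theorem pvRepOnce_len_le (s : List Char) : (pvRepOnce s).length ≤ s.length := by
  fun_induction pvRepOnce s <;> simp_all
  omega

theorem pvReplaceGo_eq (fuel : Nat) :
    ∀ (l acc : List Char), l.length ≤ fuel →
      PySem.Chars.replace.go ['/', '/'] ['/'] fuel l acc = acc.reverse ++ pvRepOnce l := by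
  induction fuel with
  | zero =>
    intro l acc h
    have : l = [] := by cases l <;> simp_all
    subst this; simp [PySem.Chars.replace.go, pvRepOnce]
  | succ fuel ih =>
    intro l acc h
    rcases l with _ | ⟨c, t⟩
    · simp [PySem.Chars.replace.go, pvRepOnce]
    · rw [PySem.Chars.replace.go]
      by_cases hp : List.isPrefixOf ['/', '/'] (c :: t) = true
      · obtain ⟨u, rfl, rfl⟩ : ∃ u, t = '/' :: u ∧ c = '/' := by
          rcases t with _ | ⟨d, u⟩
          · simp [List.isPrefixOf] at hp
          · simp [List.isPrefixOf] at hp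
            exact ⟨u, by rw [hp.2], hp.1.symm⟩
        simp only [hp, if_true]
        rw [show List.drop ['/','/'].length ('/' :: '/' :: u) = u from rfl,
          ih u (['/'].reverse ++ acc) (by simp at h ⊢; omega), pvRepOnce_dd]
        simp
      · simp only [hp, Bool.false_eq_true, if_false]
        rw [ih t (c :: acc) (by simp at h ⊢; omega),
          pvRepOnce_cons_ne c t (by
            rintro ⟨rfl, u, rfl⟩
            simp [List.isPrefixOf] at hp)]
        simp

theorem pvReplace_eq (s : List Char) :
    PySem.Chars.replace s ['/', '/'] ['/'] = pvRepOnce s := by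
  rw [PySem.Chars.replace]
  simp only [List.isEmpty]
  exact pvReplaceGo_eq s.length s [] le_rfl

theorem pvRepOnce_len_lt (s : List Char) (h : PySem.Chars.isIn ['/', '/'] s = true) :
    (pvRepOnce s).length < s.length := by
  rw [PySem.Chars.isIn_iff_infix] at h
  induction s with
  | nil => simp at h
  | cons c t ih =>
    by_cases hdd : c = '/' ∧ ∃ u, t = '/' :: u
    · obtain ⟨rfl, u, rfl⟩ := hdd
      rw [pvRepOnce_dd]
      have := pvRepOnce_len_le u
      simp; omega
    · rw [pvRepOnce_cons_ne c t hdd]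
      have hinf : ['/', '/'] <:+: t := by
        rcases List.infix_cons_iff.mp h with hpre | hinf
        · exfalso
          obtain ⟨u, hu⟩ := hpre
          rcases t with _ | ⟨d, v⟩
          · simp at hu
          · injection hu with h1 h2
            injection h2 with h3 _
            exact hdd ⟨h1.symm, v, by rw [h3]⟩
        · exact hinf
      have := ih hinf
      simpa using this

-- the 'while "//" in p2: p2 = p2.replace("//", "/")' loop
def pvAfix (s : List Char) : List Char :=
  if PySem.Chars.isIn ['/', '/'] s = true then
    pvAfix (PySem.Chars.replace s ['/', '/'] ['/'])
  else s
termination_by s.length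
decreasing_by
  rw [pvReplace_eq]; exact pvRepOnce_len_lt s (by assumption)

def normalize_sp_path (p : String) : String :=
  -- p.strip().replace("\\", "/").lstrip("/")   (lstrip with a one-char set = dropWhile; exact)
  let p2 := (PySem.Chars.replace (PySem.Chars.strip p.toList) ['\\'] ['/']).dropWhile (· == '/')
  -- while "//" in p2: p2 = p2.replace("//", "/")
  let p2 := pvAfix p2
  let low := PySem.Chars.lower p2
  -- for prefix in ("shared documents/", "documents/"): if low.startswith(prefix): p2 = p2[len(prefix):]; break
  if PySem.Chars.startswith low "shared documents/".toList then
    String.ofList (PySem.List.slice p2 (some (17 : Int)) none)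
  else if PySem.Chars.startswith low "documents/".toList then
    String.ofList (PySem.List.slice p2 (some (10 : Int)) none)
  else String.ofList p2

-- ===== PORT B =====
def normalize_sp_path_alt (p : String) : String :=
  let s := PySem.Chars.replace (PySem.Chars.strip p.toList) ['\\'] ['/']
  -- one pass: state (out, prev_slash); a '/' while prev_slash is set is skipped
  let st := s.foldl (fun st c =>
      if c = '/' then (if st.2 then st else (st.1 ++ [c], true))
      else (st.1 ++ [c], false)) (([] : List Char), true)
  let p2 := st.1
  let low := PySem.Chars.lower p2
  if PySem.Chars.startswith low "shared documents/".toList then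
    String.ofList (PySem.List.slice p2 (some (17 : Int)) none)
  else if PySem.Chars.startswith low "documents/".toList then
    String.ofList (PySem.List.slice p2 (some (10 : Int)) none)
  else String.ofList p2

-- ===== PRECONDITION & SPEC =====
def Spec_normalize_sp_path (p : String) (out : String) : Prop := out = normalize_sp_path_alt p
instance (p : String) (out : String) : Decidable (Spec_normalize_sp_path p out) := by unfold Spec_normalize_sp_path; infer_instance

-- ===== CLAIM (what is proved, stated in full; the proofs are below) =====
def Claim_equal_normalize_sp_path : Prop := ∀ (p : String), Dom_normalize_sp_path p → Spec_normalize_sp_path p (normalize_sp_path p)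

-- ===== LEMMAS AND PROOFS =====
-- recursive description of B's scan
def pvScan : Bool → List Char → List Char
  | _, [] => []
  | b, c :: t =>
    if c = '/' then (if b then pvScan true t else c :: pvScan true t)
    else c :: pvScan false t

theorem pvFoldl_eq_scan (s : List Char) : ∀ (acc : List Char) (b : Bool),
    (s.foldl (fun st c =>
      if c = '/' then (if st.2 then st else (st.1 ++ [c], true))
      else (st.1 ++ [c], false)) (acc, b)).1 = acc ++ pvScan b s := by
  induction s with
  | nil => intro acc b; simp [pvScan]
  | cons c t ih =>
    intro acc b
    by_cases hc : c = '/'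
    · subst hc
      cases b <;> simp [pvScan, List.foldl_cons, ih]
    · simp [pvScan, hc, List.foldl_cons, ih]

theorem pvScan_true_of_head_ne (s : List Char) (h : ∀ u, s ≠ '/' :: u) :
    pvScan true s = pvScan false s := by
  cases s with
  | nil => rfl
  | cons c t =>
    have : c ≠ '/' := fun hc => h t (by rw [hc])
    simp [pvScan, this]

theorem pvScan_true_dropWhile (s : List Char) :
    pvScan true s = pvScan true (s.dropWhile (· == '/')) := by
  induction s with
  | nil => rfl
  | cons c t ih =>
    by_cases hc : c = '/'
    · subst hc; simpa [pvScan] using ih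
    · simp [hc]

theorem pvScan_id_of_no_dd : ∀ (s : List Char), ¬ (['/', '/'] <:+: s) → pvScan false s = s := by
  intro s
  induction s with
  | nil => intro _; rfl
  | cons c t ih =>
    intro h
    have ht : ¬ (['/', '/'] <:+: t) := fun h' => h (List.infix_cons_iff.mpr (Or.inr h'))
    by_cases hc : c = '/'
    · subst hc
      have hhd : ∀ u, t ≠ '/' :: u := by
        rintro u rfl
        exact h (List.infix_cons_iff.mpr (Or.inl ⟨u, rfl⟩))
      simp [pvScan, pvScan_true_of_head_ne t hhd, ih ht]
    · simp [pvScan, hc, ih ht]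

theorem pvRepOnce_head_ne (t : List Char) (h : ∀ u, t ≠ '/' :: u) :
    ∀ u, pvRepOnce t ≠ '/' :: u := by
  intro u hu
  rcases t with _ | ⟨d, v⟩
  · rw [pvRepOnce.eq_def] at hu; simp at hu
  · have hd : d ≠ '/' := fun hd => h v (by rw [hd])
    rw [pvRepOnce_cons_ne d v (by rintro ⟨rfl, _⟩; exact hd rfl)] at hu
    injection hu with h1 _
    exact hd h1

theorem pvScan_repOnce (s : List Char) : ∀ b, pvScan b (pvRepOnce s) = pvScan b s := by
  fun_induction pvRepOnce s with
  | case1 t ih =>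
    intro b
    cases b <;> simp [pvScan, ih true]
  | case2 c t h1 ih =>
    intro b
    by_cases hc : c = '/'
    · subst hc
      have hne : ∀ u, t ≠ '/' :: u := fun u hu => h1 u rfl hu
      have hne' := pvRepOnce_head_ne t hne
      cases b <;>
        simp [pvScan, pvScan_true_of_head_ne _ hne, pvScan_true_of_head_ne _ hne', ih false]
    · cases b <;> simp [pvScan, hc, ih false]
  | case3 => intro b; rfl

theorem pvAfix_eq_scan (s : List Char) : pvAfix s = pvScan false s := by
  fun_induction pvAfix s with
  | case1 s h ih =>
    rw [ih, pvReplace_eq, pvScan_repOnce]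
  | case2 s h =>
    rw [pvScan_id_of_no_dd s (by rwa [← PySem.Chars.isIn_eq_false_iff, ← Bool.not_eq_true])]

theorem pvDropWhile_head_ne (s : List Char) : ∀ u, s.dropWhile (· == '/') ≠ '/' :: u := by
  induction s with
  | nil => simp
  | cons c t ih =>
    intro u
    by_cases hc : c = '/'
    · simpa [hc] using ih u
    · simp only [List.dropWhile_cons, show (c == '/') = false by simp [hc], Bool.false_eq_true,
        if_false]
      intro h
      injection h with h1 _
      exact hc h1

-- ===== VERDICT (by name: the statement is the Claim_ definition above) =====
theorem normalize_sp_path_spec : Claim_equal_normalize_sp_path := by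
  intro p _
  show _ = _
  unfold normalize_sp_path normalize_sp_path_alt
  simp only [pvFoldl_eq_scan, List.nil_append]
  rw [show pvAfix ((PySem.Chars.replace (PySem.Chars.strip p.toList) ['\\'] ['/']).dropWhile (· == '/'))
      = pvScan true (PySem.Chars.replace (PySem.Chars.strip p.toList) ['\\'] ['/']) by
    rw [pvAfix_eq_scan, pvScan_true_dropWhile]
    exact (pvScan_true_of_head_ne _ (pvDropWhile_head_ne _)).symm]
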